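-- pv_equiv track=rewrite | github.com/austral-prog/tp-7-amielpoletti-1 | loops_and_print.py | enumerate_backwards
-- ===== SOURCE A (Python) =====
-- def enumerate_backwards(lista):
--     enumerated_backwards_list = []
--     index = 0
--
--     for value in lista:
--         if value != "":
--             enumerated_backwards_list.append(f"{index}. {value[::-1]}")
--             index += 1
--
--     return enumerated_backwards_list
-- ===== SOURCE B (Python) =====
-- def enumerate_backwards(lista):
--     # Count the non-empty strings, then walk the list BACKWARDS with a
--     # count-down index, building the output back-to-front.
--     n = sum(1 for v in lista if v != "")
--     out = []
--     for v in reversed(lista):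
--         if v != "":
--             n -= 1
--             out.append(f"{n}. {v[::-1]}")
--     out.reverse()
--     return out
-- ===== Notes on version B (the rewrite author's own statement) =====
-- stated objective: alternative
-- what changed: Instead of a single forward pass with an incrementing counter, B first counts the non-empty strings, then traverses the list in reverse with a count-down index, appending results back-to-front and reversing the output at the end.
import Mathlib
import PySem

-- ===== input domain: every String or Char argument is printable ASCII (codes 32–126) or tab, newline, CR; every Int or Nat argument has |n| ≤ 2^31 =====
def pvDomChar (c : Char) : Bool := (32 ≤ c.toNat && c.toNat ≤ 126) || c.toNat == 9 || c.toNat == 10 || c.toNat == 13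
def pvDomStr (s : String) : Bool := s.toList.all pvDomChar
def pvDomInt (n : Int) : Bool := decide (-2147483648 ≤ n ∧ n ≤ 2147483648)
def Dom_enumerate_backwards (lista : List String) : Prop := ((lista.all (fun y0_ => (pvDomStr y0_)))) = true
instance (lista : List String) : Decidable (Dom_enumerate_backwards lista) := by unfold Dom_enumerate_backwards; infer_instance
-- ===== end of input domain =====

-- B counts the non-empty strings first, then walks the list in reverse with a
-- count-down index, building the output back-to-front; alternative, same cost.

-- ===== PORT A =====
-- f"{index}. {value[::-1]}": step -1 slice always returns some, getD "" is exact here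
def pvFmt (i : Int) (value : String) : String :=
  PySem.Int.toStr i ++ ". " ++ ((PySem.Str.slice? value none none (-1)).getD "")

def enumerate_backwards (lista : List String) : List String :=
  (lista.foldl
    (fun (st : List String × Int) value =>
      if value ≠ "" then (st.1 ++ [pvFmt st.2 value], st.2 + 1) else st)
    ([], 0)).1

-- ===== PORT B =====
def enumerate_backwards_alt (lista : List String) : List String :=
  let n : Int := lista.foldl (fun acc v => if v ≠ "" then acc + 1 else acc) 0
  let st := lista.reverse.foldl
    (fun (st : List String × Int) v =>
      if v ≠ "" then (st.1 ++ [pvFmt (st.2 - 1) v], st.2 - 1) else st)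
    ([], n)
  st.1.reverse

-- ===== PRECONDITION & SPEC =====
def Spec_enumerate_backwards (lista : List String) (out : List String) : Prop := out = enumerate_backwards_alt lista
instance (lista : List String) (out : List String) : Decidable (Spec_enumerate_backwards lista out) := by unfold Spec_enumerate_backwards; infer_instance

-- ===== CLAIM (what is proved, stated in full; the proofs are below) =====
def Claim_equal_enumerate_backwards : Prop := ∀ (lista : List String), Dom_enumerate_backwards lista → Spec_enumerate_backwards lista (enumerate_backwards lista)

-- ===== LEMMAS AND PROOFS =====

-- canonical form both sides are reduced to
def pvCanon (ys : List String) (i : Int) : List String :=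
  (PySem.List.enumerate (ys.filter (fun v => v != "")) i).map (fun p => pvFmt p.1 p.2)

-- A's loop, generalized
theorem pv_loopA (lista : List String) (acc : List String) (i : Int) :
    (lista.foldl
      (fun (st : List String × Int) value =>
        if value ≠ "" then (st.1 ++ [pvFmt st.2 value], st.2 + 1) else st)
      (acc, i)).1
    = acc ++ pvCanon lista i := by
  induction lista generalizing acc i with
  | nil => simp [pvCanon]
  | cons x xs ih =>
    by_cases hx : x = ""
    · simpa [pvCanon, hx, List.foldl_cons] using ih acc i
    · simpa [pvCanon, List.foldl_cons, hx, PySem.List.enumerate_cons] using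
        ih (acc ++ [pvFmt i x]) (i + 1)

-- what B's reverse loop produces, in build order
def pvDesc : List String → Int → List String
  | [], _ => []
  | x :: xs, i => if x = "" then pvDesc xs i else pvFmt (i - 1) x :: pvDesc xs (i - 1)

theorem pv_loopB (ys : List String) (acc : List String) (i : Int) :
    (ys.foldl
      (fun (st : List String × Int) v =>
        if v ≠ "" then (st.1 ++ [pvFmt (st.2 - 1) v], st.2 - 1) else st)
      (acc, i)).1
    = acc ++ pvDesc ys i := by
  induction ys generalizing acc i with
  | nil => simp [pvDesc]
  | cons x xs ih =>
    by_cases hx : x = ""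
    · simpa [pvDesc, hx] using ih acc i
    · simpa [pvDesc, hx] using ih (acc ++ [pvFmt (i - 1) x]) (i - 1)

theorem pv_count (ys : List String) (a : Int) :
    ys.foldl (fun acc v => if v ≠ "" then acc + 1 else acc) a
      = a + ((ys.filter (fun v => v != "")).length : Int) := by
  induction ys generalizing a with
  | nil => simp
  | cons x xs ih =>
    by_cases hx : x = ""
    · simpa [hx] using ih a
    · have h := ih (a + 1)
      simp only [List.foldl_cons, if_pos (show x ≠ "" from hx)] at h ⊢
      rw [h]
      simp [hx]
      omega

theorem pv_desc_rev (ys : List String) (i : Int) :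
    (pvDesc ys i).reverse
      = pvCanon ys.reverse (i - ((ys.filter (fun v => v != "")).length : Int)) := by
  induction ys generalizing i with
  | nil => simp [pvDesc, pvCanon]
  | cons x xs ih =>
    by_cases hx : x = ""
    · simpa [pvDesc, pvCanon, hx, List.filter_append] using ih i
    · simp [pvDesc, pvCanon, hx, List.filter_append, PySem.List.enumerate_append,
        PySem.List.enumerate_cons, PySem.List.enumerate_nil, ih (i - 1)]
      constructor
      · congr 1
        ring
      · congr 1
        ring

-- ===== VERDICT (by name: the statement is the Claim_ definition above) =====
theorem enumerate_backwards_spec : Claim_equal_enumerate_backwards := by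
  intro lista _
  show _ = _
  simp only [enumerate_backwards, enumerate_backwards_alt]
  rw [pv_loopA, pv_loopB, pv_count]
  simp only [List.nil_append]
  rw [pv_desc_rev]
  simp [List.filter_reverse, pvCanon]
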